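-- pv_equiv track=rewrite | github.com/polimataai/harvestingmedia | key_food.py | find_column_by_pattern
-- ===== SOURCE A (Python) =====
-- def find_column_by_pattern(columns, patterns):
--     """Find the index of a column that best matches the given patterns."""
--     # Try exact match first
--     for pattern in patterns:
--         for i, col in enumerate(columns):
--             if str(col).lower() == pattern:
--                 return i
--
--     # Then try contains match
--     for pattern in patterns:
--         for i, col in enumerate(columns):
--             if pattern in str(col).lower():
--                 return i
--
--     # Return first column as default
--     return 0
-- ===== SOURCE B (Python) =====
-- def find_column_by_pattern(columns, patterns):
--     """Single pass over the columns, tracking the best (pattern_rank, index)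
--     pair for exact and containment matches; resolve by pattern priority.
--     Stops as soon as no remaining pattern rank could improve either best."""
--     bestx = None  # (pattern_rank, column_index) of best exact match so far
--     bestc = None  # same for containment matches
--     for i, col in enumerate(columns):
--         if bestx is not None and bestx[0] == 0:
--             break  # rank 0 exact match: nothing can beat it
--         s = str(col).lower()
--         for j, p in enumerate(patterns):
--             if bestx is not None and bestx[0] <= j and bestc is not None and bestc[0] <= j:
--                 break  # later patterns cannot improve either best
--             if (bestx is None or j < bestx[0]) and s == p:
--                 bestx = (j, i)
--             if (bestc is None or j < bestc[0]) and p in s: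
--                 bestc = (j, i)
--     if bestx is not None:
--         return bestx[1]
--     if bestc is not None:
--         return bestc[1]
--     return 0
-- ===== Notes on version B (the rewrite author's own statement) =====
-- stated objective: alternative
-- what changed: Replaces A's two pattern-major restart-scanning phases by a single column-major pass that maintains the lexicographically best (pattern_rank, index) pair for exact and containment matches, then resolves by pattern priority.
import Mathlib
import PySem

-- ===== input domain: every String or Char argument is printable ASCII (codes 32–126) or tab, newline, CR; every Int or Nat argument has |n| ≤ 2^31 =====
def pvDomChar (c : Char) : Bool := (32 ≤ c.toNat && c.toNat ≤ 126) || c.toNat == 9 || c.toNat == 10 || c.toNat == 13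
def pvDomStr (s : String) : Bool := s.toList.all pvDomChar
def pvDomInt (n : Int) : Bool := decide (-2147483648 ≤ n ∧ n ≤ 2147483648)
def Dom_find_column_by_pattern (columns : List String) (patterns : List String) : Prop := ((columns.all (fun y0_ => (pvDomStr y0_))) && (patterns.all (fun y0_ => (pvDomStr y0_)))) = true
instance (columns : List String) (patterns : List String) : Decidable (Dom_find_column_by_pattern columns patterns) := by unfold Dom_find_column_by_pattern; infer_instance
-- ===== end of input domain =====

-- B replaces A's two pattern-major restart-scanning phases by a single column-major
-- pass tracking the best (pattern rank, index) pair per phase (objective: alternative).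

-- ===== PORT A =====
-- for i, col in enumerate(columns): if str(col).lower() == pattern: return i
def aExact (p : String) (i : Int) : List String → Option Int
  | [] => none
  | c :: rest => if PySem.Str.lower c == p then some i else aExact p (i + 1) rest

-- for pattern in patterns: (exact-match inner loop)
def aPhase1 (columns : List String) : List String → Option Int
  | [] => none
  | p :: ps =>
      match aExact p 0 columns with
      | some i => some i
      | none => aPhase1 columns ps

-- for i, col in enumerate(columns): if pattern in str(col).lower(): return i
def aContain (p : String) (i : Int) : List String → Option Int
  | [] => none
  | c :: rest => if PySem.Str.isIn p (PySem.Str.lower c) then some i else aContain p (i + 1) rest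

-- for pattern in patterns: (contains-match inner loop)
def aPhase2 (columns : List String) : List String → Option Int
  | [] => none
  | p :: ps =>
      match aContain p 0 columns with
      | some i => some i
      | none => aPhase2 columns ps

def find_column_by_pattern (columns : List String) (patterns : List String) : Int :=
  match aPhase1 columns patterns with
  | some i => i
  | none =>
    match aPhase2 columns patterns with
    | some i => i
    | none => 0

-- ===== PORT B =====
-- "bestx is None or j < bestx[0]"
def rankLt (j : Nat) : Option (Nat × Int) → Bool
  | none => true
  | some q => decide (j < q.1)

-- inner loop: for j, p in enumerate(patterns) (with the early break)
def bInner (s : String) (i : Int) (j : Nat) : List String →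
    Option (Nat × Int) → Option (Nat × Int) → Option (Nat × Int) × Option (Nat × Int)
  | [], bx, bc => (bx, bc)
  | p :: ps, bx, bc =>
      if !rankLt j bx && !rankLt j bc then (bx, bc)
      else bInner s i (j + 1) ps
        (if rankLt j bx && (s == p) then some (j, i) else bx)
        (if rankLt j bc && PySem.Str.isIn p s then some (j, i) else bc)

-- outer loop: for i, col in enumerate(columns) (with the early break)
def bOuter (patterns : List String) (i : Int) : List String →
    Option (Nat × Int) → Option (Nat × Int) → Option (Nat × Int) × Option (Nat × Int)
  | [], bx, bc => (bx, bc)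
  | c :: rest, bx, bc =>
      if !rankLt 0 bx then (bx, bc)
      else
        let s := PySem.Str.lower c
        let r := bInner s i 0 patterns bx bc
        bOuter patterns (i + 1) rest r.1 r.2

def find_column_by_pattern_alt (columns : List String) (patterns : List String) : Int :=
  let r := bOuter patterns 0 columns none none
  match r.1 with
  | some q => q.2
  | none =>
    match r.2 with
    | some q => q.2
    | none => 0

-- ===== PRECONDITION & SPEC =====
def Spec_find_column_by_pattern (columns : List String) (patterns : List String) (out : Int) : Prop := out = find_column_by_pattern_alt columns patterns
instance (columns : List String) (patterns : List String) (out : Int) : Decidable (Spec_find_column_by_pattern columns patterns out) := by unfold Spec_find_column_by_pattern; infer_instance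

-- ===== CLAIM (what is proved, stated in full; the proofs are below) =====
def Claim_equal_find_column_by_pattern : Prop := ∀ (columns : List String) (patterns : List String), Dom_find_column_by_pattern columns patterns → Spec_find_column_by_pattern columns patterns (find_column_by_pattern columns patterns)

-- ===== LEMMAS AND PROOFS =====

-- proof-side generic scaffolding: H p s decides whether pattern p matches lowered column s
def gHx (p s : String) : Bool := s == p
def gHc (p s : String) : Bool := PySem.Str.isIn p s

-- first index in a pattern list where f holds
def gRank (f : String → Bool) : List String → Option Nat
  | [] => none
  | p :: ps => if f p then some 0 else (gRank f ps).map (· + 1)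

-- merge a candidate rank for column index i into the running best
def mrg (b : Option (Nat × Int)) (o : Option Nat) (i : Int) : Option (Nat × Int) :=
  match o with
  | none => b
  | some j => if rankLt j b then some (j, i) else b

def rankLe (j : Nat) : Option (Nat × Int) → Bool
  | none => true
  | some q => decide (j ≤ q.1)

-- column-major best (rank, index): earlier columns win ties
def gMx (H : String → String → Bool) (pats : List String) : List String → Int → Option (Nat × Int)
  | [], _ => none
  | c :: rest, i =>
      let r := gMx H pats rest (i + 1)
      match gRank (fun p => H p (PySem.Str.lower c)) pats with
      | none => r
      | some j => if rankLe j r then some (j, i) else r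

-- pattern-major first find (A's shape, generic)
def gFind (H : String → String → Bool) (p : String) (i : Int) : List String → Option Int
  | [] => none
  | c :: rest => if H p (PySem.Str.lower c) then some i else gFind H p (i + 1) rest

def gPhase (H : String → String → Bool) (cols : List String) : List String → Option Int
  | [] => none
  | p :: ps =>
      match gFind H p 0 cols with
      | some i => some i
      | none => gPhase H cols ps

def mrgP (b m : Option (Nat × Int)) : Option (Nat × Int) :=
  match m with
  | none => b
  | some q => if rankLt q.1 b then some q else b

theorem mrg_absorb (b : Option (Nat × Int)) (j : Nat) (o : Option Nat) (i : Int)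
    (h : rankLt j b = false) : mrg b (o.map (· + j)) i = b := by
  cases b with
  | none => simp [rankLt] at h
  | some q =>
      cases o with
      | none => rfl
      | some j0 =>
          simp only [rankLt, decide_eq_false_iff_not, Nat.not_lt] at h
          simp [mrg, rankLt]
          omega

theorem mrgP_absorb0 (b m : Option (Nat × Int)) (h : rankLt 0 b = false) :
    mrgP b m = b := by
  cases b with
  | none => simp [rankLt] at h
  | some q =>
      cases m with
      | none => rfl
      | some q' =>
          simp only [rankLt, decide_eq_false_iff_not, Nat.not_lt, Nat.le_zero] at h
          simp [mrgP, rankLt, h]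

theorem step_eq (f : String → Bool) (p : String) (ps : List String) (j : Nat)
    (b : Option (Nat × Int)) (i : Int) :
    mrg (if rankLt j b && f p then some (j, i) else b) ((gRank f ps).map (· + (j + 1))) i
      = mrg b ((gRank f (p :: ps)).map (· + j)) i := by
  cases hfp : f p <;> cases hr : gRank f ps <;> cases b <;>
    simp_all [gRank, mrg, rankLt] <;>
    (try split_ifs) <;> (try simp_all) <;> omega

theorem inner_eq (s : String) (i : Int) :
    ∀ (ps : List String) (j : Nat) (bx bc : Option (Nat × Int)),
    bInner s i j ps bx bc =
      (mrg bx ((gRank (fun p => s == p) ps).map (· + j)) i,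
       mrg bc ((gRank (fun p => PySem.Str.isIn p s) ps).map (· + j)) i)
  | [], j, bx, bc => by simp [bInner, gRank, mrg]
  | p :: ps, j, bx, bc => by
      rw [bInner]
      by_cases hstop : (!rankLt j bx && !rankLt j bc) = true
      · rw [if_pos hstop]
        simp only [Bool.and_eq_true, Bool.not_eq_true'] at hstop
        exact Prod.ext (mrg_absorb bx j _ i hstop.1).symm (mrg_absorb bc j _ i hstop.2).symm
      · rw [if_neg hstop, inner_eq s i ps (j + 1)]
        exact Prod.ext (step_eq _ p ps j bx i) (step_eq _ p ps j bc i)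

theorem outer_step (b : Option (Nat × Int)) (e : Option Nat) (r : Option (Nat × Int)) (i : Int) :
    mrgP (mrg b e i) r
      = mrgP b (match e with
                | none => r
                | some j => if rankLe j r then some (j, i) else r) := by
  cases e with
  | none => rfl
  | some j =>
      cases b with
      | none =>
          cases r with
          | none => simp [mrg, mrgP, rankLt, rankLe]
          | some qr =>
              obtain ⟨jr, ir⟩ := qr
              simp only [mrg, mrgP, rankLt, rankLe]
              split_ifs <;> simp_all <;> omega
      | some qb =>
          obtain ⟨jb, ib⟩ := qb
          cases r with
          | none =>
              simp only [mrg, mrgP, rankLt, rankLe]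
              split_ifs <;> simp_all
          | some qr =>
              obtain ⟨jr, ir⟩ := qr
              simp only [mrg, mrgP, rankLt, rankLe]
              split_ifs <;> simp_all <;> omega

theorem outer_eq (pats : List String) :
    ∀ (cols : List String) (i : Int) (bx bc : Option (Nat × Int)),
    (bOuter pats i cols bx bc).1 = mrgP bx (gMx gHx pats cols i)
    ∧ ((bOuter pats i cols bx bc).1 = none →
        (bOuter pats i cols bx bc).2 = mrgP bc (gMx gHc pats cols i))
  | [], i, bx, bc => ⟨by simp [bOuter, gMx, mrgP], fun _ => by simp [bOuter, gMx, mrgP]⟩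
  | c :: rest, i, bx, bc => by
      rw [bOuter]
      by_cases hb : (!rankLt 0 bx) = true
      · rw [if_pos hb]
        simp only [Bool.not_eq_true'] at hb
        refine ⟨(mrgP_absorb0 bx _ hb).symm, fun h1 => ?_⟩
        cases bx with
        | none => simp [rankLt] at hb
        | some q => simp at h1
      · rw [if_neg hb]
        simp only [inner_eq]
        have hz : ∀ (o : Option Nat), o.map (· + 0) = o := by
          intro o; cases o <;> simp
        simp only [hz]
        obtain ⟨ih1, ih2⟩ := outer_eq pats rest (i + 1)
          (mrg bx (gRank (fun p => PySem.Str.lower c == p) pats) i)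
          (mrg bc (gRank (fun p => PySem.Str.isIn p (PySem.Str.lower c)) pats) i)
        refine ⟨?_, fun h1 => ?_⟩
        · rw [ih1]
          show mrgP (mrg _ _ i) _ = _
          rw [outer_step]
          rfl
        · rw [ih2 h1]
          show mrgP (mrg _ _ i) _ = _
          rw [outer_step]
          rfl

theorem rankLe_succ_map (j : Nat) (M : Option (Nat × Int)) :
    rankLe (j + 1) (M.map (fun q => (q.1 + 1, q.2))) = rankLe j M := by
  cases M with
  | none => rfl
  | some q => simp [rankLe]

theorem mdecomp (H : String → String → Bool) (p : String) (ps : List String) :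
    ∀ (cols : List String) (i : Int),
    gMx H (p :: ps) cols i =
      match gFind H p i cols with
      | some k => some (0, k)
      | none => (gMx H ps cols i).map (fun q => (q.1 + 1, q.2))
  | [], i => by simp [gMx, gFind]
  | c :: rest, i => by
      rw [gMx, gFind]
      cases h : H p (PySem.Str.lower c) with
      | true =>
          have h0 : ∀ r : Option (Nat × Int), rankLe 0 r = true := by
            intro r; cases r <;> simp [rankLe]
          simp [gRank, h, h0]
      | false =>
          rw [mdecomp H p ps rest (i + 1)]
          cases hf : gFind H p (i + 1) rest with
          | some k =>
              simp only [gRank, h, if_neg Bool.false_ne_true]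
              cases hr : gRank (fun p' => H p' (PySem.Str.lower c)) ps with
              | none => simp
              | some j => simp [rankLe]
          | none =>
              simp only [gRank, h, if_neg Bool.false_ne_true, gMx]
              cases hr : gRank (fun p' => H p' (PySem.Str.lower c)) ps with
              | none => simp
              | some j =>
                  simp only [Option.map_some]
                  rw [rankLe_succ_map]
                  cases rankLe j (gMx H ps rest (i + 1)) <;> simp

theorem gMx_nil_pats (H : String → String → Bool) :
    ∀ (cols : List String) (i : Int), gMx H [] cols i = none
  | [], _ => rfl
  | _ :: rest, i => by rw [gMx]; simp [gRank, gMx_nil_pats H rest (i + 1)]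

theorem phase_eq (H : String → String → Bool) (cols : List String) :
    ∀ (pats : List String),
    (gMx H pats cols 0).map (fun q => q.2) = gPhase H cols pats
  | [] => by simp [gMx_nil_pats, gPhase]
  | p :: ps => by
      rw [gPhase, mdecomp H p ps cols 0]
      cases gFind H p 0 cols with
      | some k => rfl
      | none => simp only [Option.map_map]; exact phase_eq H cols ps

theorem aExact_eq (p : String) : ∀ (cols : List String) (i : Int),
    aExact p i cols = gFind gHx p i cols
  | [], _ => rfl
  | c :: rest, i => by
      rw [aExact, gFind, aExact_eq p rest (i + 1)]; rfl

theorem aContain_eq (p : String) : ∀ (cols : List String) (i : Int),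
    aContain p i cols = gFind gHc p i cols
  | [], _ => rfl
  | c :: rest, i => by
      rw [aContain, gFind, aContain_eq p rest (i + 1)]; rfl

theorem aPhase1_eq (cols : List String) : ∀ (pats : List String),
    aPhase1 cols pats = gPhase gHx cols pats
  | [] => rfl
  | p :: ps => by rw [aPhase1, gPhase, aExact_eq, aPhase1_eq cols ps]

theorem aPhase2_eq (cols : List String) : ∀ (pats : List String),
    aPhase2 cols pats = gPhase gHc cols pats
  | [] => rfl
  | p :: ps => by rw [aPhase2, gPhase, aContain_eq, aPhase2_eq cols ps]

theorem mrgP_none (m : Option (Nat × Int)) : mrgP none m = m := by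
  cases m <;> simp [mrgP, rankLt]


-- ===== VERDICT (by name: the statement is the Claim_ definition above) =====
theorem find_column_by_pattern_spec : Claim_equal_find_column_by_pattern := by
  intro cols pats _
  show find_column_by_pattern cols pats = find_column_by_pattern_alt cols pats
  obtain ⟨e1, e2⟩ := outer_eq pats cols 0 none none
  rw [mrgP_none] at e1
  have h1 : aPhase1 cols pats = ((bOuter pats 0 cols none none).1).map (fun q => q.2) := by
    rw [e1, phase_eq, aPhase1_eq]
  simp only [find_column_by_pattern, find_column_by_pattern_alt, h1]
  cases hx : (bOuter pats 0 cols none none).1 with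
  | some q => rfl
  | none =>
      rw [mrgP_none] at e2
      have h2 : aPhase2 cols pats = ((bOuter pats 0 cols none none).2).map (fun q => q.2) := by
        rw [e2 hx, phase_eq, aPhase2_eq]
      simp only [h2]
      cases (bOuter pats 0 cols none none).2 <;> rfl
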